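-- pv_equiv track=rewrite | github.com/inoyamanaka/License-Plate-App | GUI/services/single_test_detection.py | reverse_and_keep_letters
-- ===== SOURCE A (Python) =====
-- def reverse_and_keep_letters(input_str):
--     reversed_str = input_str[::-1]
--     result_str = ''
--     found_letter = False
--
--     for char in reversed_str:
--         if char.isalpha():
--             found_letter = True
--         if found_letter or char.isalpha():
--             result_str += char
--
--     return (result_str[::-1].upper()).replace(" ", "")
-- ===== SOURCE B (Python) =====
-- def reverse_and_keep_letters(input_str):
--     last = -1
--     for i, c in enumerate(input_str):
--         if c.isalpha():
--             last = i
--     return input_str[:last + 1].upper().replace(" ", "")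
-- ===== Notes on version B (the rewrite author's own statement) =====
-- stated objective: simpler
-- what changed: Replaces A's reverse + stateful character-accumulation loop + second reverse by a single forward scan that records the index of the last alphabetic character, then slices, uppercases and strips spaces.
import Mathlib
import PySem

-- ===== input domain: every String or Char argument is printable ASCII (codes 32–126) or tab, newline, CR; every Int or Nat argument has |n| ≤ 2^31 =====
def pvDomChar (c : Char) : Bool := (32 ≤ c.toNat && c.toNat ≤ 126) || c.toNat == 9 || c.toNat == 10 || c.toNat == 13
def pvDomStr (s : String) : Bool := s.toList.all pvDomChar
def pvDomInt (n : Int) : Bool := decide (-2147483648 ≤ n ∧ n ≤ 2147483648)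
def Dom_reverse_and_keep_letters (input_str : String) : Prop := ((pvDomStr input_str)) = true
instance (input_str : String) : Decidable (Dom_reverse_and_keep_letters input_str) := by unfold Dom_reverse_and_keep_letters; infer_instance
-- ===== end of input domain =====

-- B replaces A's reverse + stateful accumulation + reverse by one forward scan for the
-- index of the last letter followed by slice/upper/replace (objective: simpler).

-- ===== PORT A =====
-- loop body of A: if char.isalpha(): found = True; if found or char.isalpha(): result += char
def pvStepA (st : List Char × Bool) (c : Char) : List Char × Bool :=
  let found := if PySem.Chars.isalpha c then true else st.2
  if found || PySem.Chars.isalpha c then (st.1 ++ [c], found) else (st.1, found)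

def reverse_and_keep_letters (input_str : String) : String :=
  -- reversed_str = input_str[::-1]
  let reversed_str : List Char := (PySem.List.slice? input_str.toList none none (-1)).getD []
  -- for char in reversed_str: …
  let st : List Char × Bool := reversed_str.foldl pvStepA ([], false)
  -- (result_str[::-1].upper()).replace(" ", "")
  String.ofList (PySem.Chars.replace (PySem.Chars.upper ((PySem.List.slice? st.1 none none (-1)).getD [])) [' '] [])

-- ===== PORT B =====
-- loop body of B: if c.isalpha(): last = i
def pvStepB (last : Int) (p : Int × Char) : Int :=
  if PySem.Chars.isalpha p.2 then p.1 else last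

def reverse_and_keep_letters_alt (input_str : String) : String :=
  -- last = -1; for i, c in enumerate(input_str): if c.isalpha(): last = i
  let last : Int := (PySem.List.enumerate input_str.toList 0).foldl pvStepB (-1)
  -- input_str[:last+1].upper().replace(" ", "")
  String.ofList (PySem.Chars.replace (PySem.Chars.upper (PySem.List.slice input_str.toList none (some (last + 1)))) [' '] [])

-- ===== PRECONDITION & SPEC =====
def Spec_reverse_and_keep_letters (input_str : String) (out : String) : Prop := out = reverse_and_keep_letters_alt input_str
instance (input_str : String) (out : String) : Decidable (Spec_reverse_and_keep_letters input_str out) := by unfold Spec_reverse_and_keep_letters; infer_instance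

-- ===== CLAIM (what is proved, stated in full; the proofs are below) =====
def Claim_equal_reverse_and_keep_letters : Prop := ∀ (input_str : String), Dom_reverse_and_keep_letters input_str → Spec_reverse_and_keep_letters input_str (reverse_and_keep_letters input_str)

-- ===== LEMMAS AND PROOFS =====

-- A's loop once found_letter is true: every remaining character is appended.
theorem pvA_loop_found (l : List Char) (acc : List Char) :
    l.foldl pvStepA (acc, true) = (acc ++ l, true) := by
  induction l generalizing acc with
  | nil => simp
  | cons c t ih => simp [List.foldl_cons, pvStepA, ih]

-- A's loop from found_letter = false: it appends exactly the suffix from the first letter on.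
theorem pvA_loop_core (l : List Char) (acc : List Char) :
    (l.foldl pvStepA (acc, false)).1 = acc ++ l.dropWhile (fun c => !PySem.Chars.isalpha c) := by
  induction l generalizing acc with
  | nil => simp
  | cons c t ih =>
    by_cases h : PySem.Chars.isalpha c = true
    · simp [List.foldl_cons, pvStepA, h, pvA_loop_found]
    · simp [List.foldl_cons, pvStepA, h, ih]

-- B's loop: bounds on `last`.
theorem pvB_last_bounds (s : List Char) (k init : Int)
    (h1 : -1 ≤ init) (h2 : init < k) :
    -1 ≤ (PySem.List.enumerate s k).foldl pvStepB init ∧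
      (PySem.List.enumerate s k).foldl pvStepB init < k + s.length := by
  induction s generalizing k init with
  | nil => simp only [PySem.List.enumerate_nil, List.foldl_nil, List.length_nil]; omega
  | cons c t ih =>
    simp only [PySem.List.enumerate_cons, List.foldl_cons, List.length_cons]
    by_cases hc : PySem.Chars.isalpha c = true
    · have := ih (k + 1) k (by omega) (by omega)
      simp only [pvStepB, hc, if_true] at this ⊢
      push_cast at this ⊢; omega
    · have := ih (k + 1) init h1 (by omega)
      simp only [pvStepB, hc] at this ⊢
      push_cast at this ⊢; omega

-- B's take equals rdropWhile of non-letters (proved by induction from the right).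
theorem pvB_take_eq (s : List Char) :
    s.take (((PySem.List.enumerate s 0).foldl pvStepB (-1)) + 1).toNat
    = s.rdropWhile (fun c => !PySem.Chars.isalpha c) := by
  induction s using List.reverseRecOn with
  | nil => simp [List.rdropWhile]
  | append_singleton t c ih =>
    rw [PySem.List.enumerate_append, List.foldl_append]
    simp only [PySem.List.enumerate_cons, PySem.List.enumerate_nil, List.foldl_cons, List.foldl_nil]
    by_cases hc : PySem.Chars.isalpha c = true
    · simp only [pvStepB, hc, if_true]
      rw [show (((0:Int) + (t.length : Int)) + 1).toNat = t.length + 1 from by omega]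
      rw [show t.length + 1 = t.length + [c].length from rfl, List.take_append]
      simp [hc]
    · rw [show pvStepB ((PySem.List.enumerate t 0).foldl pvStepB (-1)) ((0:Int) + t.length, c)
            = (PySem.List.enumerate t 0).foldl pvStepB (-1) from by simp [pvStepB, hc]]
      have hb := pvB_last_bounds t 0 (-1) (le_refl _) (by omega)
      have hlen : (((PySem.List.enumerate t 0).foldl pvStepB (-1)) + 1).toNat ≤ t.length := by omega
      rw [List.take_append_of_le_length hlen, ih]
      simp [hc]

-- ===== VERDICT (by name: the statement is the Claim_ definition above) =====
theorem reverse_and_keep_letters_spec : Claim_equal_reverse_and_keep_letters := by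
  intro input_str _
  unfold Spec_reverse_and_keep_letters reverse_and_keep_letters reverse_and_keep_letters_alt
  simp only [PySem.List.slice?_none_none_neg_one, Option.getD_some]
  rw [pvA_loop_core]
  have hb := pvB_last_bounds input_str.toList 0 (-1) (le_refl _) (by omega)
  have h0 : (0:Int) ≤ (PySem.List.enumerate input_str.toList 0).foldl pvStepB (-1) + 1 := by omega
  rw [PySem.List.slice_to _ h0]
  rw [pvB_take_eq, List.rdropWhile]
  simp
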